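-- pv_equiv track=rewrite | github.com/miliar/Code_Jam_Webscraper | solutions_python/solutions_year11_round0_nr3/645.py | getsl
-- ===== SOURCE A (Python) =====
-- def getsl(l, ln):
--   ret = []
--   ret2 = []
--   for i in range(2 ** ln):#small problem
--     bi = bin(i)[-1:1:-1]
--     tl = []
--     tl2 = []
--     for c in range(min(len(bi), ln)):
--       if bi[c] == '1':
--         tl.append(l[c])
--       else:
--         tl2.append(l[c])
--     tl2.extend([l[j] for j in range(len(bi), ln)])
--     ret2.append(tl2)
--     ret.append(tl)
--   return ret, ret2
-- ===== SOURCE B (Python) =====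
-- def getsl(l, ln):
--   pairs = [([], [])]
--   for m in range(ln):
--     e = l[m]
--     pairs = [(sub, comp + [e]) for sub, comp in pairs] + \
--             [(sub + [e], comp) for sub, comp in pairs]
--   return [sub for sub, _ in pairs], [comp for _, comp in pairs]
-- ===== Notes on version B (the rewrite author's own statement) =====
-- stated objective: alternative
-- what changed: B builds the (subset,complement) pairs incrementally by doubling a list of partial pairs once per element, instead of decoding the bits of every integer 0..2**ln-1 via bin() strings.
import Mathlib
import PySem

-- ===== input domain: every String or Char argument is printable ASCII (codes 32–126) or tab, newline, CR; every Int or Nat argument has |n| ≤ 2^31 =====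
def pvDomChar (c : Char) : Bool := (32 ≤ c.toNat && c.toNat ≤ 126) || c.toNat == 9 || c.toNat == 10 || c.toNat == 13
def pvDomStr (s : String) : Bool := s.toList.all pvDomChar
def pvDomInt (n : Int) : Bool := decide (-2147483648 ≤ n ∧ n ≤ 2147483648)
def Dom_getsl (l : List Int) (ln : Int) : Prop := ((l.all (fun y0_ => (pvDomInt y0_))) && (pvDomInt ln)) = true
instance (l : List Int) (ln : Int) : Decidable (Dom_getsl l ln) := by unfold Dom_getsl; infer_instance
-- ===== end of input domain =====

-- B replaces A's per-integer bin()-string bit decoding by incremental doubling of a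
-- list of (subset, complement) pairs; same cost class, different algorithm (objective: alternative).

-- ===== PORT A =====
-- bin(i)[-1:1:-1]: the binary digits of i, least-significant first ("0" for i = 0)
def pvBitsAux : Nat → List Char
  | 0 => []
  | n+1 => (if (n+1) % 2 = 1 then '1' else '0') :: pvBitsAux ((n+1)/2)
decreasing_by exact Nat.div_lt_self (Nat.succ_pos n) one_lt_two

def pvBin (i : Nat) : List Char := if i = 0 then ['0'] else pvBitsAux i

-- literal transliteration of A; l[c] is ported as l.getD c 0 (in range under Pre_, where
-- Python does not raise), 2 ** ln as 2 ^ ln.toNat (ln ≥ 0 under Pre_)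
def getsl (l : List Int) (ln : Int) : List (List Int) × List (List Int) :=
  (PySem.List.pyRange 0 ((2 : Int) ^ ln.toNat) 1).foldl
    (fun (r : List (List Int) × List (List Int)) i =>
      let bi := pvBin i.toNat
      let tls := (PySem.List.pyRange 0 (min ((bi.length : Int)) ln) 1).foldl
        (fun (p : List Int × List Int) c =>
          if bi.getD c.toNat ' ' = '1' then (p.1 ++ [l.getD c.toNat 0], p.2)
          else (p.1, p.2 ++ [l.getD c.toNat 0])) ([], [])
      let tl2 := tls.2 ++ (PySem.List.pyRange ((bi.length : Int)) ln 1).map (fun j => l.getD j.toNat 0)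
      (r.1 ++ [tls.1], r.2 ++ [tl2]))
    ([], [])

-- ===== PORT B =====
-- literal transliteration of Source B: double the pair list once per element
def getsl_alt (l : List Int) (ln : Int) : List (List Int) × List (List Int) :=
  let pairs := (PySem.List.pyRange 0 ln 1).foldl
    (fun (ps : List (List Int × List Int)) m =>
      let e := l.getD m.toNat 0
      ps.map (fun p => (p.1, p.2 ++ [e])) ++ ps.map (fun p => (p.1 ++ [e], p.2)))
    [([], [])]
  (pairs.map Prod.fst, pairs.map Prod.snd)

-- ===== PRECONDITION & SPEC =====
-- Python A raises TypeError for ln < 0 and IndexError for ln > len(l); exactly those are excluded.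
def Pre_getsl (l : List Int) (ln : Int) : Prop := 0 ≤ ln ∧ ln ≤ (l.length : Int)
instance (l : List Int) (ln : Int) : Decidable (Pre_getsl l ln) := by unfold Pre_getsl; infer_instance
def pvWitness_getsl : List Int × Int := ([3, -1, 4], 2)

def Spec_getsl (l : List Int) (ln : Int) (out : List (List Int) × List (List Int)) : Prop := out = getsl_alt l ln
instance (l : List Int) (ln : Int) (out : List (List Int) × List (List Int)) : Decidable (Spec_getsl l ln out) := by unfold Spec_getsl; infer_instance

-- ===== CLAIM (what is proved, stated in full; the proofs are below) =====
def Claim_equal_getsl : Prop := ∀ (l : List Int) (ln : Int), Dom_getsl l ln → Pre_getsl l ln → Spec_getsl l ln (getsl l ln)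

-- ===== LEMMAS AND PROOFS =====

-- the common canonical form: element c goes to the subset iff bit c of the row index is set
def pvPartS (l : List Int) (n k : Nat) : List Int :=
  ((List.range n).filter (fun c => k.testBit c)).map (fun c => l.getD c 0)
def pvPartC (l : List Int) (n k : Nat) : List Int :=
  ((List.range n).filter (fun c => ! k.testBit c)).map (fun c => l.getD c 0)

-- A's inner per-row loop, after range conversion
def pvInnerA (l : List Int) (i : Nat) (m : Nat) : List Int × List Int :=
  (List.range m).foldl (fun (p : List Int × List Int) c =>
    if (pvBin i).getD c ' ' = '1' then (p.1 ++ [l.getD c 0], p.2)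
    else (p.1, p.2 ++ [l.getD c 0])) ([], [])

theorem pvBitsAux_lt (i : Nat) : i < 2 ^ (pvBitsAux i).length := by
  induction i using Nat.strong_induction_on with
  | _ i IH =>
    match i with
    | 0 => simp [pvBitsAux]
    | Nat.succ j =>
      rw [pvBitsAux]
      have h2 : (j+1)/2 < j+1 := Nat.div_lt_self (Nat.succ_pos j) one_lt_two
      have h3 := IH ((j+1)/2) h2
      simp only [List.length_cons]
      rw [pow_succ]
      omega

theorem pvBin_lt (i : Nat) : i < 2 ^ (pvBin i).length := by
  by_cases hi : i = 0
  · subst hi; simp [pvBin]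
  · simpa [pvBin, hi] using pvBitsAux_lt i

theorem pvBin_high {i c : Nat} (h : (pvBin i).length ≤ c) : i.testBit c = false := by
  apply Nat.testBit_eq_false_of_lt
  exact lt_of_lt_of_le (pvBin_lt i) (Nat.pow_le_pow_right (by norm_num) h)

theorem pvBitsAux_get {i c : Nat} (hi : i ≠ 0) (h : c < (pvBitsAux i).length) :
    (pvBitsAux i).getD c ' ' = (if i.testBit c then '1' else '0') := by
  induction i using Nat.strong_induction_on generalizing c with
  | _ i IH =>
    match i with
    | 0 => exact absurd rfl hi
    | Nat.succ j =>
      rw [pvBitsAux] at h ⊢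
      match c with
      | 0 =>
        rw [Nat.testBit_zero]
        simp [List.getD]
      | Nat.succ c =>
        simp only [List.getD_cons_succ]
        have hlt : (j+1)/2 < j+1 := Nat.div_lt_self (Nat.succ_pos j) one_lt_two
        have hne : (j+1)/2 ≠ 0 := by
          intro h0
          rw [h0] at h
          simp [pvBitsAux] at h
        have hc : c < (pvBitsAux ((j+1)/2)).length := by
          simpa using h
        rw [IH ((j+1)/2) hlt hne hc, Nat.testBit_succ]

theorem pvBin_get {i c : Nat} (h : c < (pvBin i).length) :
    (pvBin i).getD c ' ' = (if i.testBit c then '1' else '0') := by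
  by_cases hi : i = 0
  · subst hi
    simp [pvBin] at h
    subst h
    simp [pvBin, List.getD]
  · simp only [pvBin, hi, if_false] at h ⊢
    exact pvBitsAux_get hi h

theorem pv_foldl_split {α : Type} (P : Nat → Prop) [DecidablePred P] (f : Nat → α)
    (L : List Nat) (a b : List α) :
    L.foldl (fun (p : List α × List α) c =>
      if P c then (p.1 ++ [f c], p.2) else (p.1, p.2 ++ [f c])) (a, b)
    = (a ++ (L.filter (fun c => decide (P c))).map f,
       b ++ (L.filter (fun c => ! decide (P c))).map f) := by
  induction L generalizing a b with
  | nil => simp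
  | cons x L IH =>
    by_cases hx : P x
    · simp [hx, IH]
    · simp [hx, IH]

theorem pv_foldl_two {α β : Type} (f g : β → α) (L : List β) (a b : List α) :
    L.foldl (fun (r : List α × List α) i => (r.1 ++ [f i], r.2 ++ [g i])) (a, b)
    = (a ++ L.map f, b ++ L.map g) := by
  induction L generalizing a b with
  | nil => simp
  | cons x L IH => simp [IH]

theorem pv_testBit_add_pow {n k c : Nat} (hc : c < n) :
    (2 ^ n + k).testBit c = k.testBit c := by
  induction c generalizing n k with
  | zero =>
    have h3 : 2 ^ n = 2 * 2 ^ (n-1) := by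
      rw [← pow_succ']
      congr 1
      omega
    have h4 : (2 ^ n + k) % 2 = k % 2 := by omega
    rw [Nat.testBit_zero, Nat.testBit_zero, h4]
  | succ c IH =>
    have h3 : 2 ^ n = 2 * 2 ^ (n-1) := by
      rw [← pow_succ']
      congr 1
      omega
    have hdiv : (2 ^ n + k) / 2 = 2 ^ (n-1) + k / 2 := by omega
    rw [Nat.testBit_succ, Nat.testBit_succ, hdiv]
    exact IH (by omega)

theorem pvPartS_lo (l : List Int) (n k : Nat) (hk : k < 2 ^ n) :
    pvPartS l (n+1) k = pvPartS l n k := by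
  unfold pvPartS
  rw [List.range_succ, List.filter_append]
  simp [Nat.testBit_eq_false_of_lt hk]

theorem pvPartC_lo (l : List Int) (n k : Nat) (hk : k < 2 ^ n) :
    pvPartC l (n+1) k = pvPartC l n k ++ [l.getD n 0] := by
  unfold pvPartC
  rw [List.range_succ, List.filter_append]
  simp [Nat.testBit_eq_false_of_lt hk]

theorem pv_testBit_hi (n k : Nat) (hk : k < 2 ^ n) : (2 ^ n + k).testBit n = true := by
  rw [Nat.testBit_two_pow_add_eq, Nat.testBit_eq_false_of_lt hk]
  rfl

theorem pv_filter_hi_pos (n k : Nat) :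
    (List.range n).filter (fun c => (2 ^ n + k).testBit c)
      = (List.range n).filter (fun c => k.testBit c) :=
  List.filter_congr (fun c hc => by rw [pv_testBit_add_pow (List.mem_range.mp hc)])

theorem pv_filter_hi_neg (n k : Nat) :
    (List.range n).filter (fun c => ! (2 ^ n + k).testBit c)
      = (List.range n).filter (fun c => ! k.testBit c) :=
  List.filter_congr (fun c hc => by rw [pv_testBit_add_pow (List.mem_range.mp hc)])

theorem pvPartS_hi (l : List Int) (n k : Nat) (hk : k < 2 ^ n) :
    pvPartS l (n+1) (2 ^ n + k) = pvPartS l n k ++ [l.getD n 0] := by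
  unfold pvPartS
  rw [List.range_succ, List.filter_append, pv_filter_hi_pos]
  simp [pv_testBit_hi n k hk]

theorem pvPartC_hi (l : List Int) (n k : Nat) (hk : k < 2 ^ n) :
    pvPartC l (n+1) (2 ^ n + k) = pvPartC l n k := by
  unfold pvPartC
  rw [List.range_succ, List.filter_append, pv_filter_hi_neg]
  simp [pv_testBit_hi n k hk]

-- A's row: the subset component, for any i
theorem pv_rowA_fst (l : List Int) (n i : Nat) :
    (pvInnerA l i (min (pvBin i).length n)).1 = pvPartS l n i := by
  unfold pvInnerA
  rw [pv_foldl_split (P := fun c => (pvBin i).getD c ' ' = '1') (f := fun c => l.getD c 0)]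
  simp only [List.nil_append]
  have hfilS : (List.range (min (pvBin i).length n)).filter
        (fun c => decide ((pvBin i).getD c ' ' = '1'))
      = (List.range (min (pvBin i).length n)).filter (fun c => i.testBit c) := by
    apply List.filter_congr
    intro c hc
    have hc2 : c < (pvBin i).length := lt_of_lt_of_le (List.mem_range.mp hc) (min_le_left _ _)
    rw [pvBin_get hc2]
    cases htb : i.testBit c <;> simp
  rw [hfilS]
  by_cases hln : (pvBin i).length ≤ n
  · rw [min_eq_left hln]
    unfold pvPartS
    have hsplit : List.range n
        = List.range (pvBin i).length
          ++ (List.range (n - (pvBin i).length)).map (fun x => (pvBin i).length + x) := by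
      rw [← List.range_add]
      congr 1
      omega
    rw [hsplit, List.filter_append]
    have h2 : ((List.range (n - (pvBin i).length)).map (fun x => (pvBin i).length + x)).filter
        (fun c => i.testBit c) = [] := by
      apply List.filter_eq_nil_iff.mpr
      intro c hc
      obtain ⟨x, _, rfl⟩ := List.mem_map.mp hc
      simp [pvBin_high (Nat.le_add_right _ _)]
    rw [h2, List.append_nil]
  · rw [min_eq_right (by omega)]
    rfl

-- A's row: the complement component (inner loop plus the trailing extend), for any i
theorem pv_rowA_snd (l : List Int) (n i : Nat) :
    (pvInnerA l i (min (pvBin i).length n)).2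
        ++ (PySem.List.pyRange ((pvBin i).length : Int) (n : Int) 1).map
             (fun j => l.getD j.toNat 0)
      = pvPartC l n i := by
  unfold pvInnerA
  rw [pv_foldl_split (P := fun c => (pvBin i).getD c ' ' = '1') (f := fun c => l.getD c 0)]
  simp only [List.nil_append]
  have hfilC : (List.range (min (pvBin i).length n)).filter
        (fun c => ! decide ((pvBin i).getD c ' ' = '1'))
      = (List.range (min (pvBin i).length n)).filter (fun c => ! i.testBit c) := by
    apply List.filter_congr
    intro c hc
    have hc2 : c < (pvBin i).length := lt_of_lt_of_le (List.mem_range.mp hc) (min_le_left _ _)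
    rw [pvBin_get hc2]
    cases htb : i.testBit c <;> simp
  rw [hfilC]
  by_cases hln : (pvBin i).length ≤ n
  · rw [min_eq_left hln]
    unfold pvPartC
    have hsplit : List.range n
        = List.range (pvBin i).length
          ++ (List.range (n - (pvBin i).length)).map (fun x => (pvBin i).length + x) := by
      rw [← List.range_add]
      congr 1
      omega
    rw [hsplit, List.filter_append]
    have h2 : ((List.range (n - (pvBin i).length)).map (fun x => (pvBin i).length + x)).filter
        (fun c => ! i.testBit c)
        = (List.range (n - (pvBin i).length)).map (fun x => (pvBin i).length + x) := by
      apply List.filter_eq_self.mpr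
      intro c hc
      obtain ⟨x, _, rfl⟩ := List.mem_map.mp hc
      simp [pvBin_high (Nat.le_add_right _ _)]
    rw [h2, List.map_append]
    congr 1
    rw [PySem.List.pyRange_one]
    rw [show (((n : Nat) : Int) - (((pvBin i).length : Nat) : Int)).toNat
        = n - (pvBin i).length from by omega]
    rw [List.map_map, List.map_map]
    apply List.map_congr_left
    intro x _
    simp only [Function.comp]
    congr 1
  · rw [min_eq_right (by omega)]
    have hr : PySem.List.pyRange ((pvBin i).length : Int) (n : Int) 1 = [] := by
      apply PySem.List.pyRange_one_eq_nil
      exact_mod_cast (by omega : n ≤ (pvBin i).length)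
    rw [hr]
    simp only [List.map_nil, List.append_nil]
    rfl

-- A in canonical form
theorem pv_getsl_eq (l : List Int) (n : Nat) :
    getsl l (n : Int)
      = ((List.range (2 ^ n)).map (fun k => pvPartS l n k),
         (List.range (2 ^ n)).map (fun k => pvPartC l n k)) := by
  simp only [getsl, Int.toNat_natCast]
  have hp : ((2 : Int) ^ n) = (((2 ^ n : Nat)) : Int) := by push_cast; ring
  rw [hp, PySem.List.pyRange_zero_natCast, List.foldl_map]
  simp only [Int.toNat_natCast]
  refine Eq.trans (pv_foldl_two
      (f := fun y : Nat => ((PySem.List.pyRange 0 (min (((pvBin y).length : Int)) ((n : Nat) : Int)) 1).foldl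
        (fun (p : List Int × List Int) c =>
          if (pvBin y).getD c.toNat ' ' = '1' then (p.1 ++ [l.getD c.toNat 0], p.2)
          else (p.1, p.2 ++ [l.getD c.toNat 0])) ([], [])).1)
      (g := fun y : Nat => ((PySem.List.pyRange 0 (min (((pvBin y).length : Int)) ((n : Nat) : Int)) 1).foldl
        (fun (p : List Int × List Int) c =>
          if (pvBin y).getD c.toNat ' ' = '1' then (p.1 ++ [l.getD c.toNat 0], p.2)
          else (p.1, p.2 ++ [l.getD c.toNat 0])) ([], [])).2
        ++ (PySem.List.pyRange (((pvBin y).length : Int)) ((n : Nat) : Int) 1).map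
             (fun j => l.getD j.toNat 0)) (List.range (2 ^ n)) [] []) ?_
  simp only [List.nil_append]
  rw [Prod.mk.injEq]
  constructor
  · apply List.map_congr_left
    intro k _
    rw [show (min (((pvBin k).length : Int)) ((n : Nat) : Int)) = ((min (pvBin k).length n : Nat) : Int)
        from (Nat.cast_min _ _).symm]
    rw [PySem.List.pyRange_zero_natCast, List.foldl_map]
    simp only [Int.toNat_natCast]
    exact pv_rowA_fst l n k
  · apply List.map_congr_left
    intro k _
    rw [show (min (((pvBin k).length : Int)) ((n : Nat) : Int)) = ((min (pvBin k).length n : Nat) : Int)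
        from (Nat.cast_min _ _).symm]
    rw [PySem.List.pyRange_zero_natCast, List.foldl_map]
    simp only [Int.toNat_natCast]
    exact pv_rowA_snd l n k

-- B's pair list in canonical form
theorem pv_pairs_eq (l : List Int) (n : Nat) :
    (PySem.List.pyRange 0 (n : Int) 1).foldl
      (fun (ps : List (List Int × List Int)) m =>
        ps.map (fun p => (p.1, p.2 ++ [l.getD m.toNat 0]))
          ++ ps.map (fun p => (p.1 ++ [l.getD m.toNat 0], p.2)))
      [([], [])]
    = (List.range (2 ^ n)).map (fun k => (pvPartS l n k, pvPartC l n k)) := by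
  induction n with
  | zero =>
    rw [PySem.List.pyRange_one_eq_nil (by norm_num)]
    simp [pvPartS, pvPartC]
  | succ n IH =>
    have hcast : ((n + 1 : Nat) : Int) = ((n : Nat) : Int) + 1 := by push_cast; ring
    rw [hcast, PySem.List.pyRange_one_succ_right (by positivity), List.foldl_append]
    simp only [List.foldl_cons, List.foldl_nil]
    rw [IH]
    simp only [Int.toNat_natCast]
    rw [List.map_map, List.map_map]
    have h2 : 2 ^ (n + 1) = 2 ^ n + 2 ^ n := by ring
    rw [h2, List.range_add, List.map_append, List.map_map]
    congr 1
    · apply List.map_congr_left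
      intro k hk
      have hk2 := List.mem_range.mp hk
      simp only [Function.comp]
      rw [pvPartS_lo l n k hk2, pvPartC_lo l n k hk2]
    · apply List.map_congr_left
      intro k hk
      have hk2 := List.mem_range.mp hk
      simp only [Function.comp]
      rw [pvPartS_hi l n k hk2, pvPartC_hi l n k hk2]

-- B in canonical form
theorem pv_getsl_alt_eq (l : List Int) (n : Nat) :
    getsl_alt l (n : Int)
      = ((List.range (2 ^ n)).map (fun k => pvPartS l n k),
         (List.range (2 ^ n)).map (fun k => pvPartC l n k)) := by
  simp only [getsl_alt]
  rw [pv_pairs_eq]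
  simp only [List.map_map]
  rfl

-- ===== VERDICT (by name: the statement is the Claim_ definition above) =====
theorem getsl_spec : Claim_equal_getsl := by
  intro l ln _ hpre
  have h0 : 0 ≤ ln := hpre.1
  have hln : ln = ((ln.toNat : Nat) : Int) := (Int.toNat_of_nonneg h0).symm
  rw [Spec_getsl, hln, pv_getsl_eq, pv_getsl_alt_eq]
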